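-- pv_equiv track=rewrite | github.com/lucainiaoge/jazzify | rules/find_key.py | binary_functions_to_unary_functions
-- ===== SOURCE A (Python) =====
-- DIM_TONIC = 1
--
-- DIM_SUBDOMINANT = 2
--
-- DIM_DOMINANT = 3
--
-- DIM_DOUBLE_DOMINANT = 4
--
-- DIM_OTHER_FUNCS = 5
--
-- DIM_STAY = 0
--
-- DIM_T2D = 1
--
-- DIM_T2S = 2
--
-- DIM_D2T = 3
--
-- DIM_S2D = 4
--
-- DIM_S2T = 5
--
-- DIM_T2DD = 6
--
-- DIM_S2DD = 7
--
-- DIM_DD2D = 8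
--
-- def binary_functions_to_unary_functions(binary_function_list):
--     N_chord = len(binary_function_list)
--     function_list = [DIM_OTHER_FUNCS]*N_chord
--     for i in reversed(range(N_chord)):
--         if binary_function_list[i] in [DIM_T2D, DIM_T2S, DIM_T2DD]:
--             function_list[i] = DIM_TONIC
--         elif binary_function_list[i] in [DIM_S2D, DIM_S2T, DIM_S2DD]:
--             function_list[i] = DIM_SUBDOMINANT
--         elif binary_function_list[i] in [DIM_D2T]:
--             function_list[i] = DIM_DOMINANT
--         elif binary_function_list[i] in [DIM_DD2D]:
--             function_list[i] = DIM_DOUBLE_DOMINANT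
--         elif binary_function_list[i] in [DIM_STAY] and i < N_chord - 1:
--             function_list[i] = function_list[i+1]
--         else:
--             function_list[i] = DIM_OTHER_FUNCS
--     return function_list
-- ===== SOURCE B (Python) =====
-- DIM_TONIC = 1
-- DIM_SUBDOMINANT = 2
-- DIM_DOMINANT = 3
-- DIM_DOUBLE_DOMINANT = 4
-- DIM_OTHER_FUNCS = 5
-- DIM_STAY = 0
-- DIM_T2D = 1
-- DIM_T2S = 2
-- DIM_D2T = 3
-- DIM_S2D = 4
-- DIM_S2T = 5
-- DIM_T2DD = 6
-- DIM_S2DD = 7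
-- DIM_DD2D = 8
--
-- def binary_functions_to_unary_functions(binary_function_list):
--     # Forward single pass: count pending STAYs; when a chord resolves to a
--     # function v, emit v for the pending run and for the chord itself.
--     out = []
--     pending = 0
--     for x in binary_function_list:
--         if x == DIM_STAY:
--             pending += 1
--             continue
--         if x in (DIM_T2D, DIM_T2S, DIM_T2DD):
--             v = DIM_TONIC
--         elif x in (DIM_S2D, DIM_S2T, DIM_S2DD):
--             v = DIM_SUBDOMINANT
--         elif x == DIM_D2T:
--             v = DIM_DOMINANT
--         elif x == DIM_DD2D:
--             v = DIM_DOUBLE_DOMINANT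
--         else:
--             v = DIM_OTHER_FUNCS
--         out.extend([v] * (pending + 1))
--         pending = 0
--     out.extend([DIM_OTHER_FUNCS] * pending)
--     return out
-- ===== Notes on version B (the rewrite author's own statement) =====
-- stated objective: alternative
-- what changed: A fills a preallocated array with a backward index loop where each STAY copies the already-computed value at i+1; B makes a single forward pass that counts a pending run of STAYs and flushes the run (and the chord itself) when the next chord resolves to a function, defaulting a trailing run to DIM_OTHER_FUNCS.
import Mathlib
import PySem

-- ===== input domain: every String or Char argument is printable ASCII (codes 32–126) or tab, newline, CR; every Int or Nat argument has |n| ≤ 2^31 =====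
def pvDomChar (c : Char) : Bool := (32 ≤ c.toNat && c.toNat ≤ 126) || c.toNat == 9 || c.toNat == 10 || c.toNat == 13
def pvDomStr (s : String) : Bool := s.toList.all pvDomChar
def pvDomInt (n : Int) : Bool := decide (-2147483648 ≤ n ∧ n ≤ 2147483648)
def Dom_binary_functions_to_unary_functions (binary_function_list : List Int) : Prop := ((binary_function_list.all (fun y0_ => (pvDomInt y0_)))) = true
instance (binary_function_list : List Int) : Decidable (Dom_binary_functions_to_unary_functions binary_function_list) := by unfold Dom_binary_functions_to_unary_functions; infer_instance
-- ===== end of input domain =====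

-- B replaces A's backward copy-from-the-right loop with a single forward pass that
-- counts a pending run of STAY chords and flushes it when the next function resolves
-- (same values, different decomposition; no speed claim).

-- ===== PORT A =====
-- loop body of A's 'for i in reversed(range(N_chord))': one branch of the if/elif
-- chain assigns function_list[i] (= .set); l[i] is read with .getD 0, exact here
-- because i ∈ range(N_chord) is always a valid index
def aBody (l : List Int) (N : Int) (fl : List Int) (i : Int) : List Int :=
  let x := (PySem.List.pyGet? l i).getD 0
  fl.set i.toNat
    (if x = 1 ∨ x = 2 ∨ x = 6 then 1
     else if x = 4 ∨ x = 5 ∨ x = 7 then 2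
     else if x = 3 then 3
     else if x = 8 then 4
     else if x = 0 ∧ i < N - 1 then (PySem.List.pyGet? fl (i + 1)).getD 5
     else 5)

def binary_functions_to_unary_functions (binary_function_list : List Int) : List Int :=
  let N : Int := binary_function_list.length
  ((PySem.List.pyRange 0 N 1).reverse).foldl
    (aBody binary_function_list N)
    (List.replicate binary_function_list.length (5 : Int))

-- ===== PORT B =====
-- direct unary value of a non-STAY binary function
def altVal (x : Int) : Int :=
  if x = 1 ∨ x = 2 ∨ x = 6 then 1
  else if x = 4 ∨ x = 5 ∨ x = 7 then 2
  else if x = 3 then 3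
  else if x = 8 then 4
  else 5

-- state: (out, pending count of unresolved STAYs)
def altStep (s : List Int × Nat) (x : Int) : List Int × Nat :=
  if x = 0 then (s.1, s.2 + 1)
  else (s.1 ++ List.replicate (s.2 + 1) (altVal x), 0)

def binary_functions_to_unary_functions_alt (binary_function_list : List Int) : List Int :=
  let s := binary_function_list.foldl altStep ([], 0)
  s.1 ++ List.replicate s.2 (5 : Int)

-- ===== PRECONDITION & SPEC =====
def Spec_binary_functions_to_unary_functions (binary_function_list : List Int) (out : List Int) : Prop := out = binary_functions_to_unary_functions_alt binary_function_list
instance (binary_function_list : List Int) (out : List Int) : Decidable (Spec_binary_functions_to_unary_functions binary_function_list out) := by unfold Spec_binary_functions_to_unary_functions; infer_instance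

-- ===== CLAIM (what is proved, stated in full; the proofs are below) =====
def Claim_equal_binary_functions_to_unary_functions : Prop := ∀ (binary_function_list : List Int), Dom_binary_functions_to_unary_functions binary_function_list → Spec_binary_functions_to_unary_functions binary_function_list (binary_functions_to_unary_functions binary_function_list)

-- ===== LEMMAS AND PROOFS =====

-- reference function: position i gets altVal of the first non-STAY at j ≥ i, else 5
def gSpec : List Int → List Int
  | [] => []
  | x :: r => (if x = 0 then (gSpec r).headD 5 else altVal x) :: gSpec r

theorem gSpec_length (l : List Int) : (gSpec l).length = l.length := by
  induction l with
  | nil => rfl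
  | cons x r ih => simp [gSpec, ih]

theorem gSpec_drop (l : List Int) (k : Nat) : (gSpec l).drop k = gSpec (l.drop k) := by
  induction l generalizing k with
  | nil => simp [gSpec]
  | cons x r ih =>
    cases k with
    | zero => rfl
    | succ k => simpa [gSpec] using ih k

-- B-side invariant
theorem alt_inv (l : List Int) (out : List Int) (p : Nat) :
    (l.foldl altStep (out, p)).1 ++ List.replicate (l.foldl altStep (out, p)).2 (5 : Int)
      = out ++ List.replicate p ((gSpec l).headD 5) ++ gSpec l := by
  induction l generalizing out p with
  | nil => simp [gSpec]
  | cons x r ih =>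
    by_cases hx : x = 0
    · rw [List.foldl_cons, altStep, if_pos hx, ih out (p + 1)]
      simp [gSpec, hx, List.replicate_succ']
    · rw [List.foldl_cons, altStep, if_neg hx,
        ih (out ++ List.replicate (p + 1) (altVal x)) 0]
      simp [gSpec, hx, List.replicate_succ']

theorem alt_eq_gSpec (l : List Int) :
    binary_functions_to_unary_functions_alt l = gSpec l := by
  simpa using alt_inv l [] 0

-- A-side invariant: running the backward loop for indices k-1 … 0 on a state that is
-- already correct from position k on yields gSpec l
theorem a_inv (l : List Int) (k : Nat) (fl : List Int)
    (hlen : fl.length = l.length) (hk : k ≤ l.length)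
    (hdrop : fl.drop k = (gSpec l).drop k) :
    ((PySem.List.pyRange 0 (k : Int) 1).reverse).foldl (aBody l (l.length : Int)) fl
      = gSpec l := by
  induction k generalizing fl with
  | zero =>
    rw [PySem.List.pyRange_one_eq_nil (by omega)]
    simpa using hdrop
  | succ k ih =>
    have hkl : k < l.length := by omega
    have hcast : ((k + 1 : Nat) : Int) = (k : Int) + 1 := by push_cast; ring
    rw [hcast, PySem.List.pyRange_one_succ_right (Int.natCast_nonneg k), List.reverse_append]
    simp only [List.reverse_singleton, List.singleton_append, List.foldl_cons]
    -- the value A writes at index k equals the head of gSpec at position k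
    have hxk : (PySem.List.pyGet? l (k : Int)).getD 0 = l[k] := by
      rw [PySem.List.pyGet?_natCast]
      simp [List.getElem?_eq_getElem hkl]
    have hread : (PySem.List.pyGet? fl ((k : Int) + 1)).getD 5
        = (gSpec (l.drop (k + 1))).headD 5 := by
      have h1 : ((k : Int) + 1) = ((k + 1 : Nat) : Int) := by push_cast; ring
      rw [h1, PySem.List.pyGet?_natCast, ← List.head?_drop, hdrop, gSpec_drop,
        List.headD_eq_head?]
    have hval :
        (if l[k] = 1 ∨ l[k] = 2 ∨ l[k] = 6 then (1 : Int)
         else if l[k] = 4 ∨ l[k] = 5 ∨ l[k] = 7 then 2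
         else if l[k] = 3 then 3
         else if l[k] = 8 then 4
         else if l[k] = 0 ∧ (k : Int) < (l.length : Int) - 1 then
           (PySem.List.pyGet? fl ((k : Int) + 1)).getD 5
         else 5)
        = (if l[k] = 0 then (gSpec (l.drop (k + 1))).headD 5 else altVal l[k]) := by
      by_cases hx0 : l[k] = 0
      · by_cases hk1 : k + 1 < l.length
        · have hc : (k : Int) < (l.length : Int) - 1 := by omega
          simp [hx0, hc, hread]
        · have hnil : l.drop (k + 1) = [] := List.drop_of_length_le (by omega)
          have hc : ¬ ((k : Int) < (l.length : Int) - 1) := by omega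
          simp [hx0, hc, hnil, gSpec]
      · simp only [altVal, hx0, false_and, if_false]
    have hgk : (gSpec l).drop k
        = (if l[k] = 0 then (gSpec (l.drop (k + 1))).headD 5 else altVal l[k])
            :: (gSpec l).drop (k + 1) := by
      rw [gSpec_drop, List.drop_eq_getElem_cons hkl, gSpec, gSpec_drop]
    have hset : ∀ v : Int, (fl.set k v).drop k = v :: fl.drop (k + 1) := by
      intro v
      rw [List.drop_set, if_neg (lt_irrefl k), Nat.sub_self,
        List.drop_eq_getElem_cons (show k < fl.length by omega)]
      rfl
    refine ih (aBody l (l.length : Int) fl (k : Int)) (by simp [aBody, hlen]) (by omega) ?_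
    show (aBody l (l.length : Int) fl (k : Int)).drop k = _
    unfold aBody
    simp only [hxk, Int.toNat_natCast]
    rw [hset, hval, hgk, hdrop]

-- ===== VERDICT (by name: the statement is the Claim_ definition above) =====
theorem binary_functions_to_unary_functions_spec : Claim_equal_binary_functions_to_unary_functions := by
  intro l _
  show _ = _
  rw [alt_eq_gSpec]
  show ((PySem.List.pyRange 0 (l.length : Int) 1).reverse).foldl
      (aBody l (l.length : Int)) (List.replicate l.length (5 : Int)) = gSpec l
  exact a_inv l l.length _ (by simp) (le_refl _)
    (by simp [gSpec_length l ▸ List.drop_length (l := gSpec l)])
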